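-- pv_equiv track=rewrite | github.com/lhssluiz/extractKindleNotesToWordFile | extraiNotasOrdenadas.py | cleanPositionLine
-- ===== SOURCE A (Python) =====
-- from operator import concat, contains
--
-- def cleanPositionLine(getPosition):
--   position = ""
--   if "Sua nota" in getPosition:
--     for characters in getPosition[22:27]:
--       if characters.isdigit():
--         position = concat(position,characters)
--       else:
--         break
--     return position
--
--   if "destaque" in getPosition:
--       for characters in getPosition[26:32]:
--         if characters.isdigit():
--           position = concat(position,characters)
--         else:
--           break
--       return position
-- ===== SOURCE B (Python) =====
-- def cleanPositionLine(getPosition):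
--     # pick the slice bounds for whichever marker is present ('Sua nota' first),
--     # then do one leading-digit extraction by counting digits with an index.
--     if "Sua nota" in getPosition:
--         seg = getPosition[22:27]
--     elif "destaque" in getPosition:
--         seg = getPosition[26:32]
--     else:
--         return None
--     n = 0
--     while n < len(seg) and seg[n].isdigit():
--         n += 1
--     return seg[:n]
-- ===== Notes on version B (the rewrite author's own statement) =====
-- stated objective: simpler
-- what changed: B selects the slice bounds once (Sua nota first, then destaque, else None) and runs a single index-counting leading-digit scan returning seg[:n], instead of A's two duplicated accumulate-and-break loops.
import Mathlib
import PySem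

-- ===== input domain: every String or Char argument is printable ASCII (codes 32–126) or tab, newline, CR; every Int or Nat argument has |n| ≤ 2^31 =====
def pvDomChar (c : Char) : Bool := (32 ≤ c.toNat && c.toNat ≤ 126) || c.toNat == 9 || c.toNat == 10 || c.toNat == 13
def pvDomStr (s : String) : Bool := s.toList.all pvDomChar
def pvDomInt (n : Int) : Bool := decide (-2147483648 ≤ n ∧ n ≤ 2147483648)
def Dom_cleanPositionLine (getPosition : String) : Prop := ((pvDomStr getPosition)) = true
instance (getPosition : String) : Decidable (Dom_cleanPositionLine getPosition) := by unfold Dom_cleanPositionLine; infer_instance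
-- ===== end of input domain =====

-- B: pick the slice bounds once and run a single leading-digit count, instead of A's two duplicated accumulate-and-break loops (simpler).

-- ===== PORT A =====
-- A's for-loop with break: accumulate digits into 'position' until a non-digit
def pvLoopA (cs : List Char) (position : List Char) : List Char :=
  match cs with
  | [] => position
  | c :: rest => if PySem.Chars.isdigit c then pvLoopA rest (position ++ [c]) else position

def cleanPositionLine (getPosition : String) : Option String :=
  let position : List Char := []
  if PySem.Str.isIn "Sua nota" getPosition then
    some (String.ofList (pvLoopA (PySem.List.slice getPosition.toList (some 22) (some 27)) position))
  else if PySem.Str.isIn "destaque" getPosition then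
    some (String.ofList (pvLoopA (PySem.List.slice getPosition.toList (some 26) (some 32)) position))
  else none

-- ===== PORT B =====
-- B's while loop: n < len(seg) and seg[n].isdigit()
def pvCountB (seg : List Char) (n : Nat) : Nat :=
  if h : n < seg.length then
    if PySem.Chars.isdigit seg[n] then pvCountB seg (n + 1) else n
  else n
termination_by seg.length - n

def cleanPositionLine_alt (getPosition : String) : Option String :=
  let segOpt : Option (List Char) :=
    if PySem.Str.isIn "Sua nota" getPosition then
      some (PySem.List.slice getPosition.toList (some 22) (some 27))
    else if PySem.Str.isIn "destaque" getPosition then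
      some (PySem.List.slice getPosition.toList (some 26) (some 32))
    else none
  match segOpt with
  | none => none
  | some seg => some (String.ofList (seg.take (pvCountB seg 0)))

-- ===== PRECONDITION & SPEC =====
def Spec_cleanPositionLine (getPosition : String) (out : Option String) : Prop := out = cleanPositionLine_alt getPosition
instance (getPosition : String) (out : Option String) : Decidable (Spec_cleanPositionLine getPosition out) := by unfold Spec_cleanPositionLine; infer_instance

-- ===== CLAIM (what is proved, stated in full; the proofs are below) =====
def Claim_equal_cleanPositionLine : Prop := ∀ (getPosition : String), Dom_cleanPositionLine getPosition → Spec_cleanPositionLine getPosition (cleanPositionLine getPosition)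

-- ===== LEMMAS AND PROOFS =====
theorem pvLoopA_eq_takeWhile (cs : List Char) (acc : List Char) :
    pvLoopA cs acc = acc ++ cs.takeWhile PySem.Chars.isdigit := by
  induction cs generalizing acc with
  | nil => simp [pvLoopA]
  | cons c rest ih =>
    by_cases h : PySem.Chars.isdigit c
    · simp [pvLoopA, h, ih]
    · simp [pvLoopA, h]

theorem pvCountB_eq (seg : List Char) (n : Nat) :
    pvCountB seg n = n + ((seg.drop n).takeWhile PySem.Chars.isdigit).length := by
  fun_induction pvCountB seg n with
  | case1 n h hd ih =>
    rw [ih, List.drop_eq_getElem_cons h, List.takeWhile_cons, hd]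
    simp; omega
  | case2 n h hd =>
    rw [List.drop_eq_getElem_cons h, List.takeWhile_cons]
    simp [hd]
  | case3 n h =>
    rw [List.drop_eq_nil_of_le (by omega)]
    simp

theorem take_count_eq (seg : List Char) :
    seg.take (pvCountB seg 0) = seg.takeWhile PySem.Chars.isdigit := by
  rw [pvCountB_eq]
  simp
  exact (List.prefix_iff_eq_take.mp (List.takeWhile_prefix _)).symm

-- ===== VERDICT (by name: the statement is the Claim_ definition above) =====
theorem cleanPositionLine_spec : Claim_equal_cleanPositionLine := by
  intro s _
  unfold Spec_cleanPositionLine cleanPositionLine cleanPositionLine_alt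
  simp only [PySem.Str.isIn_eq]
  by_cases h1 : PySem.Chars.isIn ['S', 'u', 'a', ' ', 'n', 'o', 't', 'a'] s.toList
  · simp [h1, pvLoopA_eq_takeWhile, take_count_eq]
  · by_cases h2 : PySem.Chars.isIn ['d', 'e', 's', 't', 'a', 'q', 'u', 'e'] s.toList
    · simp [h1, h2, pvLoopA_eq_takeWhile, take_count_eq]
    · simp [h1, h2]
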